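-- pv_equiv track=rewrite | github.com/khoivankarik/UDPT_Project | stackprj/stackbase/views.py | is_valid_text
-- ===== SOURCE A (Python) =====
-- def is_valid_text(text):
--     # List of words that are not allowed in the text
--     blacklist_words = [
--         "fuck",
--         "bitch",
--         "whore",
--         "asshole",
--         "shit",
--         "bastard",
--         "cunt",
--         "dick",
--         "pussy",
--         "cock",
--         "retard",
--         "slut",
--         "wanker",
--         "jerk",
--         "prick",
--         "twat",
--         "douche",
--         "douchebag",
--         "moron",
--         "idiot",
--         "dumbass",
--         "dipshit",
--         "motherfucker",
--         "sonofabitch",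
--         "bullshit",
--         "crap",
--         "arse",
--         "bollocks",
--         "frick",
--         "tits",
--         "boobs",
--     ]
--
--     # Minimum length required for the text
--     min_length = 10
--
--     # Check if the text contains any blacklisted words
--     for word in blacklist_words:
--         if word.lower() in text.lower():
--             return False
--
--     # Check if the text meets the minimum length requirement
--     if len(text) < min_length:
--         return False
--
--     # If the text passes all checks, it is considered valid
--     return True
-- ===== SOURCE B (Python) =====
-- def is_valid_text(text):
--     blacklist_words = [
--         "fuck", "bitch", "whore", "asshole", "shit", "bastard", "cunt",
--         "dick", "pussy", "cock", "retard", "slut", "wanker", "jerk",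
--         "prick", "twat", "douche", "douchebag", "moron", "idiot",
--         "dumbass", "dipshit", "motherfucker", "sonofabitch", "bullshit",
--         "crap", "arse", "bollocks", "frick", "tits", "boobs",
--     ]
--     lowered = text.lower()
--     # one left-to-right scan: at each position test for a blacklisted prefix
--     for i in range(len(lowered)):
--         for word in blacklist_words:
--             if lowered.startswith(word, i):
--                 return False
--     return len(text) >= 10
-- ===== Notes on version B (the rewrite author's own statement) =====
-- stated objective: alternative
-- what changed: replaces the 31 independent whole-text substring scans (one per blacklisted word) by a single left-to-right scan over the lowercased text that tests each position once for any blacklisted prefix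
import Mathlib
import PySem

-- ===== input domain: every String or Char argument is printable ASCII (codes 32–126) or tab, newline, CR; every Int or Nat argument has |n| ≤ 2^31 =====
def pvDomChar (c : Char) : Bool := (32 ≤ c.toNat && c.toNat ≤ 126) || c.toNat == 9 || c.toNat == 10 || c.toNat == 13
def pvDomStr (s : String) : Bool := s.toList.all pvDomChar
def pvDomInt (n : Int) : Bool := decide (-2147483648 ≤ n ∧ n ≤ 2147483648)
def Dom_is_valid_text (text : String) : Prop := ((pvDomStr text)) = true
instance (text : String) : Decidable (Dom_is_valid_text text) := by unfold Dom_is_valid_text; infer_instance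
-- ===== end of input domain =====

-- B replaces A's 31 independent whole-text substring scans by one left-to-right scan
-- testing each position for a blacklisted prefix (objective: alternative).


-- ===== PORT A =====
def blacklistWords : List String :=
  ["fuck", "bitch", "whore", "asshole", "shit", "bastard", "cunt",
   "dick", "pussy", "cock", "retard", "slut", "wanker", "jerk",
   "prick", "twat", "douche", "douchebag", "moron", "idiot",
   "dumbass", "dipshit", "motherfucker", "sonofabitch", "bullshit",
   "crap", "arse", "bollocks", "frick", "tits", "boobs"]

-- A's for-loop with early return: one isIn scan per word, then the length check
def goA (text : String) : List String → Bool
  | [] => if PySem.Str.len text < 10 then false else true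
  | w :: ws =>
      if PySem.Str.isIn (PySem.Str.lower w) (PySem.Str.lower text) then false
      else goA text ws

def is_valid_text (text : String) : Bool := goA text blacklistWords

-- ===== PORT B =====
-- B's nested loop: at each position of the lowered text, test every word as a prefix
def hasBlack (ws : List (List Char)) : List Char → Bool
  | [] => false
  | c :: t => ws.any (fun w => PySem.Chars.startswith (c :: t) w) || hasBlack ws t

def is_valid_text_alt (text : String) : Bool :=
  if hasBlack (blacklistWords.map String.toList) (PySem.Str.lower text).toList then false
  else decide (10 ≤ PySem.Str.len text)

-- ===== PRECONDITION & SPEC =====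
def Spec_is_valid_text (text : String) (out : Bool) : Prop := out = is_valid_text_alt text
instance (text : String) (out : Bool) : Decidable (Spec_is_valid_text text out) := by unfold Spec_is_valid_text; infer_instance

-- ===== CLAIM (what is proved, stated in full; the proofs are below) =====
def Claim_equal_is_valid_text : Prop := ∀ (text : String), Dom_is_valid_text text → Spec_is_valid_text text (is_valid_text text)

-- ===== LEMMAS AND PROOFS =====

-- A's early-return loop as an 'any' over the word list
theorem goA_eq_any (text : String) (ws : List String) :
    goA text ws =
      if ws.any (fun w => PySem.Str.isIn (PySem.Str.lower w) (PySem.Str.lower text)) then false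
      else if PySem.Str.len text < 10 then false else true := by
  induction ws with
  | nil => rfl
  | cons w ws ih =>
      show (if PySem.Str.isIn (PySem.Str.lower w) (PySem.Str.lower text) then false
            else goA text ws) = _
      by_cases h : PySem.Str.isIn (PySem.Str.lower w) (PySem.Str.lower text) = true
      · rw [if_pos h, if_pos (by rw [List.any_cons, h, Bool.true_or])]
      · rw [if_neg h, ih, List.any_cons, (Bool.not_eq_true _).mp h, Bool.false_or]

-- 'any' is a congruence for functions agreeing on the members
theorem any_congr_mem {α : Type} (ws : List α) (f g : α → Bool)
    (h : ∀ w ∈ ws, f w = g w) : ws.any f = ws.any g := by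
  induction ws with
  | nil => rfl
  | cons a l ih =>
      rw [List.any_cons, List.any_cons, h a (List.mem_cons_self ..),
        ih (fun w hw => h w (List.mem_cons_of_mem _ hw))]

-- 'any' distributes over ||
theorem any_or_any {α : Type} (ws : List α) (f g : α → Bool) :
    (ws.any f || ws.any g) = ws.any (fun w => f w || g w) := by
  rw [Bool.eq_iff_iff]
  simp only [Bool.or_eq_true, List.any_eq_true]
  constructor
  · rintro (⟨w, hw, hf⟩ | ⟨w, hw, hg⟩)
    · exact ⟨w, hw, Or.inl hf⟩
    · exact ⟨w, hw, Or.inr hg⟩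
  · rintro ⟨w, hw, hf | hg⟩
    · exact Or.inl ⟨w, hw, hf⟩
    · exact Or.inr ⟨w, hw, hg⟩

-- B's position scan finds a word iff some word occurs as a substring (words nonempty)
theorem hasBlack_eq_any (ws : List (List Char)) (h : ∀ w ∈ ws, w ≠ []) (s : List Char) :
    hasBlack ws s = ws.any (fun w => PySem.Chars.isIn w s) := by
  induction s with
  | nil =>
      show false = ws.any (fun w => PySem.Chars.isIn w [])
      symm
      rw [List.any_eq_false]
      intro w hw
      rw [Bool.not_eq_true, PySem.Chars.isIn_eq_false_iff]
      intro hinf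
      exact h w hw (List.eq_nil_of_infix_nil hinf)
  | cons c t ih =>
      show (ws.any (fun w => PySem.Chars.startswith (c :: t) w) || hasBlack ws t) = _
      rw [ih, any_or_any]
      refine any_congr_mem _ _ _ (fun w _ => ?_)
      rw [Bool.eq_iff_iff]
      simp only [Bool.or_eq_true, PySem.Chars.isIn_iff_infix, PySem.Chars.startswith_iff]
      exact (List.infix_cons_iff).symm

-- every blacklisted word is already lowercase
theorem blacklist_lower :
    ∀ w ∈ blacklistWords, PySem.Str.lower w = w := by decide

-- every blacklisted word is nonempty
theorem blacklist_ne_nil :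
    ∀ w ∈ blacklistWords.map String.toList, w ≠ [] := by decide

-- the two 'any' conditions agree (B tests the literal words, A lowercases them first)
theorem any_map_eq (text : String) :
    ((blacklistWords.map String.toList).any
        (fun w => PySem.Chars.isIn w (PySem.Str.lower text).toList))
      = blacklistWords.any (fun w => PySem.Str.isIn (PySem.Str.lower w) (PySem.Str.lower text)) := by
  rw [List.any_map]
  refine any_congr_mem _ _ _ (fun w hw => ?_)
  show PySem.Chars.isIn w.toList (PySem.Str.lower text).toList = _
  rw [blacklist_lower w hw]
  simp [PySem.Str.isIn]

-- A's tail 'if len < 10 then False else True' is the Boolean 'len >= 10'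
theorem if_lt_ten (n : Int) : (if n < 10 then false else true) = decide (10 ≤ n) := by
  by_cases h : n < 10
  · rw [if_pos h]; symm; rw [decide_eq_false_iff_not]; omega
  · rw [if_neg h]; symm; rw [decide_eq_true_eq]; omega

-- ===== VERDICT (by name: the statement is the Claim_ definition above) =====
theorem is_valid_text_spec : Claim_equal_is_valid_text := by
  intro text _
  unfold Spec_is_valid_text is_valid_text is_valid_text_alt
  rw [goA_eq_any, hasBlack_eq_any _ blacklist_ne_nil, any_map_eq, if_lt_ten]
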